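-- pv_equiv track=rewrite | github.com/Vasek18/google_foobar | escape-pods.py | solution
-- ===== SOURCE A (Python) =====
-- def solution(entrances, exits, path):
--     entranceRoomsNumber = len(entrances)
--     exitRoomsNumber = len(exits)
--     roomsNumber = len(path)
--
--     savedBunniesCount = 0
--
--     for roomNumber in range(roomsNumber):
--         if roomNumber in entrances:
--             continue
--         if roomNumber in exits:
--             continue
--
--         corridorToRoomCapacity = 0
--         for entrance in entrances:
--             corridorToRoomCapacity += path[entrance][roomNumber]
--
--         roomCapacity = sum(path[roomNumber])
--
--         savedBunniesCount += min(roomCapacity, corridorToRoomCapacity)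
--
--     return savedBunniesCount
-- ===== SOURCE B (Python) =====
-- def solution(entrances, exits, path):
--     n = len(path)
--     incoming = [0] * n
--     for entrance in entrances:
--         incoming = [acc + cap for acc, cap in zip(incoming, path[entrance])]
--     ent = set(entrances)
--     ex = set(exits)
--     total = 0
--     for room, inc in enumerate(incoming):
--         if room not in ent and room not in ex:
--             total += min(sum(path[room]), inc)
--     return total
-- ===== Notes on version B (the rewrite author's own statement) =====
-- stated objective: alternative
-- what changed: A rescans the entrance list inside every room's loop; B first accumulates the entrance rows into one incoming column-sum vector, then makes a single enumerate pass over that vector with set-based entrance/exit skipping.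
-- outside the precondition, e.g. on solution([5], [0], [[0]]): A returns 0, B raises IndexError
import Mathlib
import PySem

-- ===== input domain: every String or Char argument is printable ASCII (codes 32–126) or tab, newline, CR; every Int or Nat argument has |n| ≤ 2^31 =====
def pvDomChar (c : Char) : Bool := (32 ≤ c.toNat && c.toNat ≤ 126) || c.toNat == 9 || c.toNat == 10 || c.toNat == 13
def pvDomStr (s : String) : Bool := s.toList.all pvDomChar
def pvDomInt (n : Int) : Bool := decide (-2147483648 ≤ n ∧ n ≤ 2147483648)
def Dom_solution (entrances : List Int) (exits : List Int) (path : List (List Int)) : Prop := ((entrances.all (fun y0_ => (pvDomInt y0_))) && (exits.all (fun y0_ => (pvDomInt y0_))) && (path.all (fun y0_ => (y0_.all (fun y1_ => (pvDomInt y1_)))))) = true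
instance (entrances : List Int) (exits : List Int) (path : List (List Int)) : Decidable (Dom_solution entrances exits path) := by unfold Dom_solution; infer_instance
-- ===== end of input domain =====

-- B replaces A's per-room rescan of the entrance list by one accumulated incoming
-- column-sum vector followed by a single enumerate pass (alternative decomposition, same cost).


-- ===== PORT A =====
def solution (entrances : List Int) (exits : List Int) (path : List (List Int)) : Int :=
  let roomsNumber := path.length
  (PySem.List.pyRange 0 roomsNumber 1).foldl (fun savedBunniesCount roomNumber =>
    if entrances.contains roomNumber then savedBunniesCount
    else if exits.contains roomNumber then savedBunniesCount
    else
      let corridorToRoomCapacity :=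
        entrances.foldl (fun c entrance =>
          c + PySem.List.pyGetD (PySem.List.pyGetD path entrance []) roomNumber 0) 0
      let roomCapacity := (PySem.List.pyGetD path roomNumber []).sum
      savedBunniesCount + min roomCapacity corridorToRoomCapacity) 0

-- ===== PORT B =====
def solution_alt (entrances : List Int) (exits : List Int) (path : List (List Int)) : Int :=
  let n := path.length
  let incoming := entrances.foldl
    (fun inc entrance => List.zipWith (· + ·) inc (PySem.List.pyGetD path entrance []))
    (List.replicate n 0)
  let ent := PySem.Set.ofList entrances
  let ex := PySem.Set.ofList exits
  (PySem.List.enumerate incoming 0).foldl (fun total p =>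
    if !(PySem.Set.contains ent p.1) && !(PySem.Set.contains ex p.1) then
      total + min (PySem.List.pyGetD path p.1 []).sum p.2
    else total) 0

-- ===== PRECONDITION & SPEC =====
-- Pre_ excludes exactly the inputs on which A raises IndexError: an entrance index outside
-- [-n, n), or a corridor row too short at a room index that is not skipped as entrance/exit.
-- The only excluded inputs on which A still returns are out-of-range entrances with every room
-- skipped, where A returns 0 without touching path while B reads path[entrance] and raises.
def Pre_solution (entrances : List Int) (exits : List Int) (path : List (List Int)) : Prop :=
  (∀ e ∈ entrances, PySem.Raise.InRange path.length e) ∧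
  (∀ j : Nat, j < path.length → (j : Int) ∉ entrances → (j : Int) ∉ exits →
    ∀ e ∈ entrances, j < (PySem.List.pyGetD path e []).length)
instance (entrances : List Int) (exits : List Int) (path : List (List Int)) : Decidable (Pre_solution entrances exits path) := by unfold Pre_solution; infer_instance

def pvWitness_solution : List Int × List Int × List (List Int) :=
  ([0], [2], [[0, 3, 1], [4, 0, 2], [5, 5, 0]])

def Spec_solution (entrances : List Int) (exits : List Int) (path : List (List Int)) (out : Int) : Prop := out = solution_alt entrances exits path
instance (entrances : List Int) (exits : List Int) (path : List (List Int)) (out : Int) : Decidable (Spec_solution entrances exits path out) := by unfold Spec_solution; infer_instance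

-- ===== CLAIM (what is proved, stated in full; the proofs are below) =====
def Claim_equal_solution : Prop := ∀ (entrances : List Int) (exits : List Int) (path : List (List Int)), Dom_solution entrances exits path → Pre_solution entrances exits path → Spec_solution entrances exits path (solution entrances exits path)

-- ===== LEMMAS AND PROOFS =====

-- membership in set(xs) is membership in xs
theorem contains_ofList {xs : List Int} {y : Int} :
    PySem.Set.contains (PySem.Set.ofList xs) y = xs.contains y := by
  rw [Bool.eq_iff_iff]
  simp [PySem.Set.mem_ofList]

-- the accumulated incoming vector: which indices survive the zip truncations, and their value
theorem incoming_spec (rows : List (List Int)) (inc : List Int) :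
    (∀ j : Nat, j < (rows.foldl (fun i r => List.zipWith (· + ·) i r) inc).length ↔
        j < inc.length ∧ ∀ r ∈ rows, j < r.length) ∧
    ∀ j : Nat, j < (rows.foldl (fun i r => List.zipWith (· + ·) i r) inc).length →
      (rows.foldl (fun i r => List.zipWith (· + ·) i r) inc).getD j 0 =
        inc.getD j 0 + (rows.map (fun r => r.getD j 0)).sum := by
  induction rows generalizing inc with
  | nil => simp
  | cons r rows ih =>
    have ih' := ih (List.zipWith (· + ·) inc r)
    have hlen : (List.zipWith (· + ·) inc r).length = min inc.length r.length := by
      simp [List.length_zipWith]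
    constructor
    · intro j
      rw [List.foldl_cons, ih'.1 j, hlen]
      constructor
      · rintro ⟨hj, h⟩
        exact ⟨(lt_min_iff.mp hj).1, by
          intro r' hr'
          rcases List.mem_cons.mp hr' with h' | h'
          · exact h' ▸ (lt_min_iff.mp hj).2
          · exact h r' h'⟩
      · rintro ⟨hj, h⟩
        exact ⟨lt_min_iff.mpr ⟨hj, h r (by simp)⟩, fun r' hr' => h r' (by simp [hr'])⟩
    · intro j hj
      rw [List.foldl_cons] at hj ⊢
      have hv := ih'.2 j hj
      have hjz : j < (List.zipWith (· + ·) inc r).length := ((ih'.1 j).mp hj).1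
      have hji : j < inc.length := by rw [hlen] at hjz; omega
      have hjr : j < r.length := by rw [hlen] at hjz; omega
      have hz : (List.zipWith (· + ·) inc r).getD j 0 = inc.getD j 0 + r.getD j 0 := by
        rw [List.getD_eq_getElem _ _ hjz, List.getElem_zipWith,
            List.getD_eq_getElem _ _ hji, List.getD_eq_getElem _ _ hjr]
      rw [hv, hz, List.map_cons, List.sum_cons]
      ring

-- ===== VERDICT (by name: the statement is the Claim_ definition above) =====
theorem solution_spec : Claim_equal_solution := by
  intro entrances exits path _ hpre
  obtain ⟨hE, hrows⟩ := hpre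
  simp only [Spec_solution, solution, solution_alt]
  have hinc := incoming_spec (entrances.map fun e => PySem.List.pyGetD path e [])
    (List.replicate path.length 0)
  rw [List.foldl_map] at hinc
  set F := entrances.foldl
      (fun inc entrance => List.zipWith (· + ·) inc (PySem.List.pyGetD path entrance []))
      (List.replicate path.length 0) with hF
  have hiff : ∀ j : Nat, j < F.length ↔
      j < path.length ∧ ∀ e ∈ entrances, j < (PySem.List.pyGetD path e []).length := by
    intro j
    rw [hinc.1 j]
    simp
  have hLn : F.length ≤ path.length := by
    by_contra h
    exact absurd ((hiff path.length).mp (by omega)).1 (by omega)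
  -- every room index in [F.length, n) is an entrance or an exit
  have hskip : ∀ j : Nat, F.length ≤ j → j < path.length →
      (j : Int) ∈ entrances ∨ (j : Int) ∈ exits := by
    intro j h1 h2
    by_contra h
    push Not at h
    exact absurd ((hiff j).mpr ⟨h2, hrows j h2 h.1 h.2⟩) (by omega)
  -- B's enumerate fold is a fold over pyRange 0 F.length
  rw [PySem.List.enumerate_eq_map_pyRange _ (0 : Int), List.foldl_map]
  -- split A's range at F.length
  rw [show ((path.length : Int)) = ((path.length : Nat) : Int) from rfl,
      PySem.List.pyRange_one_append 0 (F.length : Int) (path.length : Int)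
        (by positivity) (by exact_mod_cast hLn),
      List.foldl_append]
  simp only [PySem.List.len_eq]
  -- the tail of A's range contributes nothing
  have htail : ∀ acc : Int, (PySem.List.pyRange (F.length : Int) (path.length : Int)).foldl
      (fun savedBunniesCount roomNumber =>
        if entrances.contains roomNumber then savedBunniesCount
        else if exits.contains roomNumber then savedBunniesCount
        else
          savedBunniesCount + min (PySem.List.pyGetD path roomNumber []).sum
            (entrances.foldl (fun c entrance =>
              c + PySem.List.pyGetD (PySem.List.pyGetD path entrance []) roomNumber 0) 0)) acc
      = acc := by
    intro acc
    rw [PySem.List.foldl_congr_mem _ _ (fun acc _ => acc) acc ?_, PySem.List.foldl_ignore]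
    intro acc j hj
    obtain ⟨hjl, hjn⟩ := PySem.List.mem_pyRange_one.mp hj
    have h0 : 0 ≤ j := le_trans (by positivity) hjl
    have := hskip j.toNat (by omega) (by omega)
    rw [show ((j.toNat : Nat) : Int) = j by omega] at this
    rcases this with h | h
    · simp [h]
    · simp [h]
  rw [htail]
  -- and the heads agree pointwise
  refine PySem.List.foldl_congr_mem _ _ _ _ ?_
  intro acc j hj
  obtain ⟨hj0, hjF⟩ := PySem.List.mem_pyRange_one.mp hj
  have hjt : j.toNat < F.length := by omega
  have hjn : j.toNat < path.length := by omega
  have hincval : PySem.List.pyGetD F j 0 =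
      entrances.foldl (fun c entrance =>
        c + PySem.List.pyGetD (PySem.List.pyGetD path entrance []) j 0) 0 := by
    rw [PySem.List.pyGetD_eq_getElem _ _ hj0 (by exact_mod_cast hjF)]
    have h2 := hinc.2 j.toNat hjt
    rw [List.map_map] at h2
    rw [List.getD_eq_getElem _ _ hjt] at h2
    rw [h2, PySem.List.foldl_add]
    have hmap : entrances.map ((fun r => r.getD j.toNat 0) ∘ (fun e => PySem.List.pyGetD path e [])) =
        entrances.map (fun e => PySem.List.pyGetD (PySem.List.pyGetD path e []) j 0) := by
      refine List.map_congr_left ?_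
      simp only [Function.comp]
      intro e he
      have hlt : j.toNat < (PySem.List.pyGetD path e []).length :=
        ((hiff j.toNat).mp hjt).2 e he
      rw [PySem.List.pyGetD_eq_getElem _ _ hj0 (by omega),
          List.getD_eq_getElem _ _ hlt]
    rw [hmap]
    simp
  rw [hincval, contains_ofList, contains_ofList]
  by_cases h1 : j ∈ entrances <;> by_cases h2 : j ∈ exits <;> simp [h1, h2]
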